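-- pv_equiv track=rewrite | github.com/zjx-zhuang/trans | src/services/sql_chunker.py | _split_by_semicolon
-- ===== SOURCE A (Python) =====
-- def _split_by_semicolon(sql: str) -> list[str]:
--     """Split SQL by semicolons, respecting string literals."""
--     statements = []
--     current = []
--     in_string = False
--     string_char = None
--
--     for char in sql:
--         if char in ("'", '"') and not in_string:
--             in_string = True
--             string_char = char
--         elif char == string_char and in_string:
--             in_string = False
--
--         if char == ';' and not in_string:
--             stmt = ''.join(current).strip()
--             if stmt:
--                 statements.append(stmt)
--             current = []
--         else:
--             current.append(char)
--
--     # 最后一个语句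
--     stmt = ''.join(current).strip()
--     if stmt:
--         statements.append(stmt)
--
--     return statements
-- ===== SOURCE B (Python) =====
-- def _split_by_semicolon(sql: str) -> list[str]:
--     """Split SQL by semicolons, respecting string literals.
--
--     Two passes: locate the splitting semicolons by index, then slice the
--     original string between them."""
--     cuts = []
--     in_string = False
--     string_char = None
--     for i, char in enumerate(sql):
--         if char in ("'", '"') and not in_string:
--             in_string = True
--             string_char = char
--         elif char == string_char and in_string:
--             in_string = False
--         if char == ';' and not in_string:
--             cuts.append(i)
--
--     statements = []
--     start = 0
--     for c in cuts + [len(sql)]: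
--         stmt = sql[start:c].strip()
--         if stmt:
--             statements.append(stmt)
--         start = c + 1
--     return statements
-- ===== Notes on version B (the rewrite author's own statement) =====
-- stated objective: alternative
-- what changed: B replaces A's per-character accumulator buffer (flushed and joined at each semicolon) by a two-pass design: one scan records the indices of splitting semicolons, a second pass slices the original string between consecutive cut points, stripping and keeping non-empty pieces.
import Mathlib
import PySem

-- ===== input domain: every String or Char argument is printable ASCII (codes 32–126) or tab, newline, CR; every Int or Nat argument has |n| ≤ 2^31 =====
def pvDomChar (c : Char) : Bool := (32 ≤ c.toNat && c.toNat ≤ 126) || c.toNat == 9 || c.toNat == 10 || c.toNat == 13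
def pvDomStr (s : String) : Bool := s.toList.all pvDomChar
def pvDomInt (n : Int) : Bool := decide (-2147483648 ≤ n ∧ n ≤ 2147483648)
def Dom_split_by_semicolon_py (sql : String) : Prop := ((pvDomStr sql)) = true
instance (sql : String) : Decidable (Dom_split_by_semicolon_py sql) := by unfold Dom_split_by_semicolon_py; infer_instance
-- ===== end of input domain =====

-- B splits by slicing the original string between recorded semicolon indices instead of
-- flushing a per-character accumulator; same O(n) cost, different decomposition.


-- ===== PORT A =====
def split_by_semicolon_py (sql : String) : List String :=
  let r := sql.toList.foldl
    (fun (st : List String × List Char × Bool × Option Char) char =>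
      -- st = (statements, current, in_string, string_char); u = the two reassigned vars
      let u :=
        if (char = '\'' ∨ char = '"') ∧ st.2.2.1 = false then (true, some char)
        else if some char = st.2.2.2 ∧ st.2.2.1 = true then (false, st.2.2.2)
        else (st.2.2.1, st.2.2.2)
      if char = ';' ∧ u.1 = false then
        let stmt := PySem.Str.strip (String.ofList st.2.1)
        (if stmt ≠ "" then st.1 ++ [stmt] else st.1, [], u.1, u.2)
      else
        (st.1, st.2.1 ++ [char], u.1, u.2))
    ([], [], false, none)
  let stmt := PySem.Str.strip (String.ofList r.2.1)
  if stmt ≠ "" then r.1 ++ [stmt] else r.1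

-- ===== PORT B =====
def split_by_semicolon_py_alt (sql : String) : List String :=
  let scan := (PySem.List.enumerate sql.toList).foldl
    (fun (st : List Int × Bool × Option Char) p =>
      -- st = (cuts, in_string, string_char); p = (i, char); u = the two reassigned vars
      let u :=
        if (p.2 = '\'' ∨ p.2 = '"') ∧ st.2.1 = false then (true, some p.2)
        else if some p.2 = st.2.2 ∧ st.2.1 = true then (false, st.2.2)
        else (st.2.1, st.2.2)
      (if p.2 = ';' ∧ u.1 = false then st.1 ++ [p.1] else st.1, u.1, u.2))
    ([], false, none)
  let r := (scan.1 ++ [PySem.Str.len sql]).foldl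
    (fun (st : List String × Int) c =>
      let stmt := PySem.Str.strip (PySem.Str.slice sql (some st.2) (some c))
      (if stmt ≠ "" then st.1 ++ [stmt] else st.1, c + 1))
    ([], 0)
  r.1

-- ===== PRECONDITION & SPEC =====
def Spec_split_by_semicolon_py (sql : String) (out : List String) : Prop := out = split_by_semicolon_py_alt sql
instance (sql : String) (out : List String) : Decidable (Spec_split_by_semicolon_py sql out) := by unfold Spec_split_by_semicolon_py; infer_instance

-- ===== CLAIM (what is proved, stated in full; the proofs are below) =====
def Claim_equal_split_by_semicolon_py : Prop := ∀ (sql : String), Dom_split_by_semicolon_py sql → Spec_split_by_semicolon_py sql (split_by_semicolon_py sql)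

-- ===== LEMMAS AND PROOFS =====

/-- The string-literal state transition both loops perform. -/
def pvUpd (is : Bool) (sc : Option Char) (c : Char) : Bool × Option Char :=
  if (c = '\'' ∨ c = '"') ∧ is = false then (true, some c)
  else if some c = sc ∧ is = true then (false, sc)
  else (is, sc)

/-- A's loop body (defeq to the lambda in `split_by_semicolon_py`). -/
def pvStepA (st : List String × List Char × Bool × Option Char) (char : Char) :
    List String × List Char × Bool × Option Char :=
  let u := pvUpd st.2.2.1 st.2.2.2 char
  if char = ';' ∧ u.1 = false then
    let stmt := PySem.Str.strip (String.ofList st.2.1)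
    (if stmt ≠ "" then st.1 ++ [stmt] else st.1, [], u.1, u.2)
  else
    (st.1, st.2.1 ++ [char], u.1, u.2)

/-- B's first-pass loop body (defeq to the first lambda in `split_by_semicolon_py_alt`). -/
def pvStepB (st : List Int × Bool × Option Char) (p : Int × Char) :
    List Int × Bool × Option Char :=
  let u := pvUpd st.2.1 st.2.2 p.2
  (if p.2 = ';' ∧ u.1 = false then st.1 ++ [p.1] else st.1, u.1, u.2)

/-- B's second-pass loop body (defeq to the second lambda in `split_by_semicolon_py_alt`). -/
def pvStepC (sql : String) (st : List String × Int) (c : Int) : List String × Int :=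
  let stmt := PySem.Str.strip (PySem.Str.slice sql (some st.2) (some c))
  (if stmt ≠ "" then st.1 ++ [stmt] else st.1, c + 1)

/-- A's loop plus its final flush, as structural recursion. -/
def pvRunA (stmts : List String) (cur : List Char) (is : Bool) (sc : Option Char) :
    List Char → List String
  | [] =>
    let stmt := PySem.Str.strip (String.ofList cur)
    if stmt ≠ "" then stmts ++ [stmt] else stmts
  | c :: cs =>
    let u := pvUpd is sc c
    if c = ';' ∧ u.1 = false then
      let stmt := PySem.Str.strip (String.ofList cur)
      pvRunA (if stmt ≠ "" then stmts ++ [stmt] else stmts) [] u.1 u.2 cs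
    else
      pvRunA stmts (cur ++ [c]) u.1 u.2 cs

/-- The semicolon cut indices B's first pass collects, from position `i` onward. -/
def pvCuts (i : Int) (is : Bool) (sc : Option Char) : List Char → List Int
  | [] => []
  | c :: cs =>
    let u := pvUpd is sc c
    (if c = ';' ∧ u.1 = false then [i] else []) ++ pvCuts (i + 1) u.1 u.2 cs

/-- B's second pass as structural recursion over the cut list. -/
def pvPieces (sql : String) (start : Int) : List Int → List String
  | [] =>
    let stmt := PySem.Str.strip (PySem.Str.slice sql (some start) (some (PySem.Str.len sql)))
    if stmt ≠ "" then [stmt] else []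
  | c :: cuts =>
    let stmt := PySem.Str.strip (PySem.Str.slice sql (some start) (some c))
    (if stmt ≠ "" then [stmt] else []) ++ pvPieces sql (c + 1) cuts

theorem pvRunA_aux (cs : List Char) :
    ∀ (stmts : List String) (cur : List Char) (is : Bool) (sc : Option Char),
    (let r := cs.foldl pvStepA (stmts, cur, is, sc)
     let stmt := PySem.Str.strip (String.ofList r.2.1)
     if stmt ≠ "" then r.1 ++ [stmt] else r.1) = pvRunA stmts cur is sc cs := by
  induction cs with
  | nil => intro stmts cur is sc; simp [pvRunA]
  | cons c cs ih =>
    intro stmts cur is sc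
    rw [pvRunA]
    simp only [List.foldl_cons]
    by_cases h : c = ';' ∧ (pvUpd is sc c).1 = false
    · simp only [pvStepA]
      rw [if_pos h, if_pos h]
      exact ih _ _ _ _
    · simp only [pvStepA]
      rw [if_neg h, if_neg h]
      exact ih _ _ _ _

theorem pvRunA_eq (sql : String) :
    split_by_semicolon_py sql = pvRunA [] [] false none sql.toList := by
  rw [← pvRunA_aux]; rfl

theorem pvCuts_aux (cs : List Char) :
    ∀ (i : Int) (acc : List Int) (is : Bool) (sc : Option Char),
    ((PySem.List.enumerate cs i).foldl pvStepB (acc, is, sc)).1 = acc ++ pvCuts i is sc cs := by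
  induction cs with
  | nil => intro i acc is sc; simp [pvCuts, PySem.List.enumerate_nil]
  | cons c cs ih =>
    intro i acc is sc
    rw [pvCuts, PySem.List.enumerate_cons]
    simp only [List.foldl_cons]
    by_cases h : c = ';' ∧ (pvUpd is sc c).1 = false
    · simp only [pvStepB]
      rw [if_pos h, if_pos h]
      rw [ih]
      simp
    · simp only [pvStepB]
      rw [if_neg h, if_neg h]
      rw [ih]
      simp
  
theorem pvPieces_aux (sql : String) (cuts : List Int) :
    ∀ (res : List String) (start : Int),
    ((cuts ++ [PySem.Str.len sql]).foldl (pvStepC sql) (res, start)).1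
      = res ++ pvPieces sql start cuts := by
  induction cuts with
  | nil =>
    intro res start
    rw [pvPieces]
    simp only [List.nil_append, List.foldl_cons, List.foldl_nil, pvStepC]
    split_ifs <;> simp
  | cons c cuts ih =>
    intro res start
    rw [pvPieces]
    simp only [List.cons_append, List.foldl_cons, pvStepC]
    split_ifs <;> rw [ih] <;> simp
  
theorem pvAlt_eq (sql : String) :
    split_by_semicolon_py_alt sql = pvPieces sql 0 (pvCuts 0 false none sql.toList) := by
  show ((((PySem.List.enumerate sql.toList 0).foldl pvStepB ([], false, none)).1
      ++ [PySem.Str.len sql]).foldl (pvStepC sql) ([], 0)).1 = _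
  rw [pvCuts_aux, pvPieces_aux]
  simp

/-- `String.ofList` of a clamped take-drop is the corresponding Python slice. -/
theorem pvSlice_eq (sql : String) (start b : Nat) :
    String.ofList ((sql.toList.drop start).take (b - start))
      = PySem.Str.slice sql (some (start : Int)) (some (b : Int)) := by
  have h : (PySem.Str.slice sql (some (start : Int)) (some (b : Int))).toList
      = (sql.toList.drop start).take (b - start) := by
    rw [PySem.Str.toList_slice, PySem.Chars.slice_eq_listSlice, PySem.List.slice_natCast]
  rw [← h, String.ofList_toList]

theorem pvMain (sql : String) (cs : List Char) :
    ∀ (i start : Nat) (is : Bool) (sc : Option Char) (stmts : List String),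
    start ≤ i → sql.toList.drop i = cs →
    pvRunA stmts ((sql.toList.drop start).take (i - start)) is sc cs
      = stmts ++ pvPieces sql (start : Int) (pvCuts (i : Int) is sc cs) := by
  induction cs with
  | nil =>
    intro i start is sc stmts hle hdrop
    have hlen : sql.toList.length ≤ i := List.drop_eq_nil_iff.mp hdrop
    rw [pvRunA, pvCuts, pvPieces]
    have hcur : (sql.toList.drop start).take (i - start)
        = (sql.toList.drop start).take (sql.toList.length - start) := by
      rw [List.take_of_length_le (by rw [List.length_drop]; omega), List.take_of_length_le (by rw [List.length_drop])]
    rw [hcur, pvSlice_eq, PySem.Str.len_eq]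
    split_ifs <;> simp
  | cons c cs ih =>
    intro i start is sc stmts hle hdrop
    have hi : i < sql.toList.length := by
      rcases Nat.lt_or_ge i sql.toList.length with h' | h'
      · exact h'
      · rw [List.drop_eq_nil_iff.mpr h'] at hdrop
        simp at hdrop
    have hget : sql.toList[i]? = some c := by
      have h0 : (sql.toList.drop i)[0]? = some c := by rw [hdrop]; rfl
      rw [List.getElem?_drop] at h0
      simpa using h0
    have hdrop' : sql.toList.drop (i + 1) = cs := by
      have := congrArg List.tail hdrop
      simpa [List.tail_drop] using this
    rw [pvRunA, pvCuts]
    by_cases h : c = ';' ∧ (pvUpd is sc c).1 = false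
    · rw [if_pos h, if_pos h]
      have hih := ih (i + 1) (i + 1) (pvUpd is sc c).1 (pvUpd is sc c).2
        (if PySem.Str.strip (String.ofList ((sql.toList.drop start).take (i - start))) ≠ ""
         then stmts ++ [PySem.Str.strip (String.ofList ((sql.toList.drop start).take (i - start)))]
         else stmts) (le_refl _) hdrop'
      simp only [Nat.sub_self, List.take_zero] at hih
      rw [hih]
      simp only [List.singleton_append]
      rw [pvPieces]
      rw [pvSlice_eq]
      push_cast
      split_ifs <;> simp
    · rw [if_neg h, if_neg h]
      have hcur : (sql.toList.drop start).take (i - start) ++ [c]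
          = (sql.toList.drop start).take (i + 1 - start) := by
        have hidx : (sql.toList.drop start)[i - start]? = some c := by
          rw [List.getElem?_drop]
          rw [show start + (i - start) = i by omega]
          exact hget
        rw [show i + 1 - start = (i - start) + 1 by omega, List.take_add_one, hidx]
        rfl
      rw [hcur]
      have hih := ih (i + 1) start (pvUpd is sc c).1 (pvUpd is sc c).2 stmts (by omega) hdrop'
      rw [hih]
      push_cast
      simp

-- ===== VERDICT (by name: the statement is the Claim_ definition above) =====
theorem split_by_semicolon_py_spec : Claim_equal_split_by_semicolon_py := by
  intro sql _
  unfold Spec_split_by_semicolon_py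
  rw [pvRunA_eq, pvAlt_eq]
  have h := pvMain sql sql.toList 0 0 false none [] (le_refl 0) (by simp)
  simpa using h
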